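-- pv_equiv track=rewrite | github.com/IKNOWINOT/Murphy-System | Murphy System/src/murphy_core/providers.py | _infer_domain_tags
-- ===== SOURCE A (Python) =====
-- from typing import Any, Dict, List, Optional
--
-- def _infer_domain_tags(lower: str) -> List[str]:
--     tags: List[str] = []
--     for key, tag in [
--         ("billing", "finance"),
--         ("invoice", "finance"),
--         ("workflow", "automation"),
--         ("automation", "automation"),
--         ("swarm", "swarm"),
--         ("voice", "voice"),
--         ("meeting", "collaboration"),
--         ("security", "security"),
--         ("compliance", "compliance"),
--         ("dashboard", "ui"),
--         ("webapp", "ui"),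
--     ]:
--         if key in lower and tag not in tags:
--             tags.append(tag)
--     return tags or ["general"]
-- ===== SOURCE B (Python) =====
-- def _infer_domain_tags(lower: str) -> list:
--     # Position-driven scan: walk the string once and at each index test which
--     # keywords start there, collecting the matched tags in a set; then emit the
--     # tags in canonical (first-appearance) order.
--     table = [
--         ("billing", "finance"), ("invoice", "finance"),
--         ("workflow", "automation"), ("automation", "automation"),
--         ("swarm", "swarm"), ("voice", "voice"),
--         ("meeting", "collaboration"), ("security", "security"),
--         ("compliance", "compliance"), ("dashboard", "ui"), ("webapp", "ui"),
--     ]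
--     found = set()
--     for i in range(len(lower)):
--         for kw, tag in table:
--             if lower.startswith(kw, i):
--                 found.add(tag)
--     order = ["finance", "automation", "swarm", "voice", "collaboration",
--              "security", "compliance", "ui"]
--     tags = [t for t in order if t in found]
--     return tags or ["general"]
-- ===== Notes on version B (the rewrite author's own statement) =====
-- stated objective: alternative
-- what changed: B scans the input string position by position, testing which keywords start at each index and collecting the matched tags in a set, then emits the tags in canonical first-appearance order; A instead scans the keyword table with per-keyword substring tests and a dedup check on the growing output list.
import Mathlib
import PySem

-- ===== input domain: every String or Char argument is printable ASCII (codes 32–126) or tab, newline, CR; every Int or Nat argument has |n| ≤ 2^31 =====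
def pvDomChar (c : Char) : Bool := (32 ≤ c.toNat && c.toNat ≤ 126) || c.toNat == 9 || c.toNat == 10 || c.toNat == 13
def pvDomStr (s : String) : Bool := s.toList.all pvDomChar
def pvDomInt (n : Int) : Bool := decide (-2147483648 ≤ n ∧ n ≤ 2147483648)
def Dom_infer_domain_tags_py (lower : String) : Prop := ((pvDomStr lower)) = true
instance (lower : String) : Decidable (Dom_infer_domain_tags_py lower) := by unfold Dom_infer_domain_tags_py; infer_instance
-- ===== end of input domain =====

-- B replaces A's keyword-table scan with a position-driven scan of the string
-- (collect matched tags in a set, then emit them in canonical order); objective: alternative.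


-- ===== PORT A =====
-- Literal port of A: fold over the (key, tag) pairs, appending tag when key is a
-- substring of lower and tag is not yet collected; ["general"] if nothing matched.
def infer_domain_tags_py (lower : String) : List String :=
  let tags := ([("billing", "finance"), ("invoice", "finance"),
      ("workflow", "automation"), ("automation", "automation"),
      ("swarm", "swarm"), ("voice", "voice"),
      ("meeting", "collaboration"), ("security", "security"),
      ("compliance", "compliance"), ("dashboard", "ui"),
      ("webapp", "ui")] : List (String × String)).foldl
    (fun tags kt =>
      if PySem.Str.isIn kt.1 lower && !(tags.contains kt.2) then tags ++ [kt.2] else tags) []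
  if tags = [] then ["general"] else tags

-- ===== PORT B =====
-- B's keyword table and the canonical output order of the tags.
def pvTable : List (String × String) :=
  [("billing", "finance"), ("invoice", "finance"),
   ("workflow", "automation"), ("automation", "automation"),
   ("swarm", "swarm"), ("voice", "voice"),
   ("meeting", "collaboration"), ("security", "security"),
   ("compliance", "compliance"), ("dashboard", "ui"), ("webapp", "ui")]

def pvOrder : List String :=
  ["finance", "automation", "swarm", "voice", "collaboration",
   "security", "compliance", "ui"]

-- Port of B: for each index i of the string, for each (kw, tag), if the keyword starts
-- at i (Python's lower.startswith(kw, i); exact for 0 ≤ i as PySem.Chars.startswith on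
-- the drop), add the tag to a set; then keep the tags of pvOrder that are in the set.
def infer_domain_tags_py_alt (lower : String) : List String :=
  let s := lower.toList
  let found := (List.range s.length).foldl
    (fun found i => pvTable.foldl
      (fun f kt => if PySem.Chars.startswith (s.drop i) kt.1.toList then PySem.Set.add f kt.2 else f)
      found)
    PySem.Set.empty
  let tags := pvOrder.filter (fun t => PySem.Set.contains found t)
  if tags = [] then ["general"] else tags

-- ===== PRECONDITION & SPEC =====
def Spec_infer_domain_tags_py (lower : String) (out : List String) : Prop := out = infer_domain_tags_py_alt lower
instance (lower : String) (out : List String) : Decidable (Spec_infer_domain_tags_py lower out) := by unfold Spec_infer_domain_tags_py; infer_instance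

-- ===== CLAIM (what is proved, stated in full; the proofs are below) =====
def Claim_equal_infer_domain_tags_py : Prop := ∀ (lower : String), Dom_infer_domain_tags_py lower → Spec_infer_domain_tags_py lower (infer_domain_tags_py lower)

-- ===== LEMMAS AND PROOFS =====

-- A's table, grouped by tag in first-appearance order (proof-only helper).
def pvGroups : List (String × List String) :=
  [("finance", ["billing", "invoice"]),
   ("automation", ["workflow", "automation"]),
   ("swarm", ["swarm"]), ("voice", ["voice"]),
   ("collaboration", ["meeting"]), ("security", ["security"]),
   ("compliance", ["compliance"]), ("ui", ["dashboard", "webapp"])]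

-- ---- B-side characterization: membership in the set built by the nested fold ----

-- Membership in a fold of conditional Set.add over a list.
theorem pv_contains_foldl {α : Type} (l : List α) (p : α → Bool) (g : α → String)
    (f0 : PySem.Set String) (y : String) :
    ((l.foldl (fun f a => if p a then PySem.Set.add f (g a) else f) f0).contains y)
    = (f0.contains y || l.any (fun a => p a && (y == g a))) := by
  induction l generalizing f0 with
  | nil => simp
  | cons a rest ih =>
    simp only [List.foldl_cons, List.any_cons, ih]
    by_cases hp : p a = true
    · simp [hp, Bool.or_assoc, Bool.beq_eq_decide_eq]
    · simp [Bool.not_eq_true] at hp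
      simp [hp]

-- Membership in B's outer fold over the string positions.
theorem pv_contains_outer (s : List Char) (l : List Nat) (f0 : PySem.Set String) (y : String) :
    ((l.foldl (fun found i => pvTable.foldl
        (fun f kt => if PySem.Chars.startswith (s.drop i) kt.1.toList then PySem.Set.add f kt.2 else f)
        found) f0).contains y)
    = (f0.contains y || l.any (fun i => pvTable.any
        (fun kt => PySem.Chars.startswith (s.drop i) kt.1.toList && (y == kt.2)))) := by
  induction l generalizing f0 with
  | nil => simp
  | cons i rest ih =>
    simp only [List.foldl_cons, List.any_cons, ih, pv_contains_foldl, Bool.or_assoc]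

-- Swapping the two any-scans (positions × table → table × positions).
theorem pv_any_swap {α β : Type} (l1 : List α) (l2 : List β) (P : α → β → Bool) (Q : β → Bool) :
    (l1.any fun i => l2.any fun k => P i k && Q k)
    = (l2.any fun k => Q k && l1.any fun i => P i k) := by
  rw [Bool.eq_iff_iff]
  simp only [List.any_eq_true, Bool.and_eq_true]
  constructor
  · rintro ⟨i, hi, k, hk, hP, hQ⟩; exact ⟨k, hk, hQ, i, hi, hP⟩
  · rintro ⟨k, hk, hQ, i, hi, hP⟩; exact ⟨i, hi, k, hk, hP, hQ⟩

-- A nonempty keyword starts at some position of s iff it is a substring of s.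
theorem pv_any_starts_eq_isIn (s kw : List Char) (h : kw ≠ []) :
    ((List.range s.length).any (fun i => PySem.Chars.startswith (s.drop i) kw))
    = PySem.Chars.isIn kw s := by
  rw [Bool.eq_iff_iff]
  simp only [List.any_eq_true, List.mem_range, PySem.Chars.startswith_iff,
    ← PySem.Chars.exists_prefix_drop_iff_isIn]
  constructor
  · rintro ⟨i, _, hp⟩; exact ⟨i, hp⟩
  · rintro ⟨j, hp⟩
    by_cases hj : j < s.length
    · exact ⟨j, hj, hp⟩
    · exfalso
      rw [List.drop_eq_nil_of_le (by omega)] at hp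
      exact h (List.prefix_nil.mp hp)

-- ---- A-side characterization: the dedup fold over the table, group by group ----

-- Once a tag is already collected, folding A's step over keywords for that tag changes nothing.
theorem pv_fold_mem (lower t : String) (kws : List String) (acc : List String) (h : t ∈ acc) :
    List.foldl
      (fun tags kt =>
        if PySem.Str.isIn kt.1 lower && !(tags.contains kt.2) then tags ++ [kt.2] else tags)
      acc (kws.map fun k => (k, t)) = acc := by
  induction kws with
  | nil => rfl
  | cons k rest ih =>
    simp only [List.map_cons, List.foldl_cons]
    have hstep :
        (if (PySem.Str.isIn k lower && !acc.contains t) = true then acc ++ [t] else acc) = acc := by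
      simp [h]
    rw [hstep]
    exact ih

-- Folding A's step over one tag's keyword group appends the tag exactly when some keyword matches.
theorem pv_fold_group (lower t : String) (kws : List String) (acc : List String) (h : t ∉ acc) :
    List.foldl
      (fun tags kt =>
        if PySem.Str.isIn kt.1 lower && !(tags.contains kt.2) then tags ++ [kt.2] else tags)
      acc (kws.map fun k => (k, t))
    = if kws.any (fun kw => PySem.Str.isIn kw lower) then acc ++ [t] else acc := by
  induction kws with
  | nil => rfl
  | cons k rest ih =>
    simp only [List.map_cons, List.foldl_cons, List.any_cons]
    by_cases hk : PySem.Chars.isIn k.toList lower.toList = true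
    · have hstep :
          (if (PySem.Str.isIn k lower && !acc.contains t) = true then acc ++ [t] else acc)
          = acc ++ [t] := by
        simp [hk, h]
      rw [hstep, pv_fold_mem lower t rest (acc ++ [t]) (by simp)]
      simp [hk]
    · have hk' : PySem.Chars.isIn k.toList lower.toList = false := by simpa using hk
      have hstep :
          (if (PySem.Str.isIn k lower && !acc.contains t) = true then acc ++ [t] else acc)
          = acc := by
        simp [hk']
      rw [hstep, ih]
      simp [hk']

-- A's fold over the flattened groups equals acc ++ the groups' filterMap,
-- provided no group tag is in acc and the group tags are distinct.
theorem pv_fold_groups (lower : String) (groups : List (String × List String))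
    (acc : List String) (h : ∀ g ∈ groups, g.1 ∉ acc) (hnd : (groups.map Prod.fst).Nodup) :
    List.foldl
      (fun tags kt =>
        if PySem.Str.isIn kt.1 lower && !(tags.contains kt.2) then tags ++ [kt.2] else tags)
      acc (groups.flatMap fun g => g.2.map fun k => (k, g.1))
    = acc ++ groups.filterMap
        (fun g => if g.2.any (fun kw => PySem.Str.isIn kw lower) then some g.1 else none) := by
  induction groups generalizing acc with
  | nil => simp
  | cons g rest ih =>
    obtain ⟨t, kws⟩ := g
    simp only [List.flatMap_cons, List.foldl_append, List.filterMap_cons]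
    rw [pv_fold_group lower t kws acc (h (t, kws) (List.mem_cons_self))]
    simp only [List.map_cons, List.nodup_cons] at hnd
    by_cases hm : kws.any (fun kw => PySem.Str.isIn kw lower) = true
    · have hrest : ∀ g' ∈ rest, g'.1 ∉ acc ++ [t] := by
        intro g' hg'
        simp only [List.mem_append, List.mem_singleton]
        rintro (hin | hin)
        · exact h g' (List.mem_cons_of_mem _ hg') hin
        · exact hnd.1 (hin ▸ List.mem_map_of_mem hg')
      rw [hm, if_pos rfl, ih (acc ++ [t]) hrest hnd.2]
      simp
    · simp only [Bool.not_eq_true] at hm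
      rw [hm]
      simp only [Bool.false_eq_true, if_false]
      exact ih acc (fun g' hg' => h g' (List.mem_cons_of_mem _ hg')) hnd.2

-- ===== VERDICT (by name: the statement is the Claim_ definition above) =====
set_option maxHeartbeats 1000000 in
theorem infer_domain_tags_py_spec : Claim_equal_infer_domain_tags_py := by
  intro lower _
  unfold Spec_infer_domain_tags_py infer_domain_tags_py infer_domain_tags_py_alt
  -- A side: the table is the flattening of pvGroups; fold it group by group.
  have hlist :
      ([("billing", "finance"), ("invoice", "finance"),
        ("workflow", "automation"), ("automation", "automation"),
        ("swarm", "swarm"), ("voice", "voice"),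
        ("meeting", "collaboration"), ("security", "security"),
        ("compliance", "compliance"), ("dashboard", "ui"),
        ("webapp", "ui")] : List (String × String))
      = pvGroups.flatMap (fun g => g.2.map fun k => (k, g.1)) := by decide
  rw [hlist, pv_fold_groups lower pvGroups [] (by intro g _ hg; simp at hg) (by decide)]
  -- B side: turn set membership into "some keyword matches somewhere", then into isIn.
  simp only [pv_contains_outer, pv_any_swap]
  have h1 := fun s => pv_any_starts_eq_isIn s "billing".toList (by decide)
  have h2 := fun s => pv_any_starts_eq_isIn s "invoice".toList (by decide)
  have h3 := fun s => pv_any_starts_eq_isIn s "workflow".toList (by decide)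
  have h4 := fun s => pv_any_starts_eq_isIn s "automation".toList (by decide)
  have h5 := fun s => pv_any_starts_eq_isIn s "swarm".toList (by decide)
  have h6 := fun s => pv_any_starts_eq_isIn s "voice".toList (by decide)
  have h7 := fun s => pv_any_starts_eq_isIn s "meeting".toList (by decide)
  have h8 := fun s => pv_any_starts_eq_isIn s "security".toList (by decide)
  have h9 := fun s => pv_any_starts_eq_isIn s "compliance".toList (by decide)
  have h10 := fun s => pv_any_starts_eq_isIn s "dashboard".toList (by decide)
  have h11 := fun s => pv_any_starts_eq_isIn s "webapp".toList (by decide)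
  simp only [pvTable, List.any_cons, List.any_nil,
    h1, h2, h3, h4, h5, h6, h7, h8, h9, h10, h11,
    PySem.Set.empty, PySem.Set.contains, List.contains_nil, Bool.false_or]
  -- Both sides are now branch trees over the same eleven substring tests: evaluate
  -- the literal group/order lists and case on the tests.
  simp only [pvGroups, pvOrder, List.filterMap_cons, List.filterMap_nil, List.filter_cons,
    List.filter_nil, List.any_cons, List.any_nil, List.nil_append, PySem.Str.isIn_eq,
    String.reduceBEq, beq_self_eq_true, Bool.false_and, Bool.true_and, Bool.or_false,
    Bool.false_or]
  generalize PySem.Chars.isIn "billing".toList lower.toList = b1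
  generalize PySem.Chars.isIn "invoice".toList lower.toList = b2
  generalize PySem.Chars.isIn "workflow".toList lower.toList = b3
  generalize PySem.Chars.isIn "automation".toList lower.toList = b4
  generalize PySem.Chars.isIn "swarm".toList lower.toList = b5
  generalize PySem.Chars.isIn "voice".toList lower.toList = b6
  generalize PySem.Chars.isIn "meeting".toList lower.toList = b7
  generalize PySem.Chars.isIn "security".toList lower.toList = b8
  generalize PySem.Chars.isIn "compliance".toList lower.toList = b9
  generalize PySem.Chars.isIn "dashboard".toList lower.toList = b10
  generalize PySem.Chars.isIn "webapp".toList lower.toList = b11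
  revert b1 b2 b3 b4 b5 b6 b7 b8 b9 b10 b11
  decide
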